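-- pv_equiv track=rewrite | github.com/twopis/twopis | getWordCounts.py | getTokensForCutoff
-- ===== SOURCE A (Python) =====
-- def getTokensForCutoff(tokenInfoList, tokenCutoff, authorCutoff, prevAuthorCutoff):
--     count = 0
--     chosenTokens = []
--     skippedTokens = []
--     for tokenInfo in tokenInfoList:
--         authorFreq = tokenInfo[2]
--         if (authorFreq > authorCutoff):
--             count += 1
--             chosenTokens.append(tokenInfo)
--         elif (authorFreq > prevAuthorCutoff):
--             skippedTokens.append(tokenInfo)
--         if (count >= tokenCutoff):
--             break
--     return chosenTokens, skippedTokens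
-- ===== SOURCE B (Python) =====
-- def getTokensForCutoff(tokenInfoList, tokenCutoff, authorCutoff, prevAuthorCutoff):
--     # Find where the running count of frequent tokens reaches the cutoff,
--     # then split that prefix into chosen and skipped with two filters.
--     end = len(tokenInfoList)
--     count = 0
--     for i, t in enumerate(tokenInfoList):
--         count += t[2] > authorCutoff
--         if count >= tokenCutoff:
--             end = i + 1
--             break
--     prefix = tokenInfoList[:end]
--     chosenTokens = [t for t in prefix if t[2] > authorCutoff]
--     skippedTokens = [t for t in prefix if prevAuthorCutoff < t[2] <= authorCutoff]
--     return chosenTokens, skippedTokens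
-- ===== Notes on version B (the rewrite author's own statement) =====
-- stated objective: alternative
-- what changed: Replaces the single interleaved accumulate-and-break loop by a boundary scan that finds where the running count of frequent tokens reaches the cutoff, followed by two independent filter passes over that prefix.
import Mathlib
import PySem

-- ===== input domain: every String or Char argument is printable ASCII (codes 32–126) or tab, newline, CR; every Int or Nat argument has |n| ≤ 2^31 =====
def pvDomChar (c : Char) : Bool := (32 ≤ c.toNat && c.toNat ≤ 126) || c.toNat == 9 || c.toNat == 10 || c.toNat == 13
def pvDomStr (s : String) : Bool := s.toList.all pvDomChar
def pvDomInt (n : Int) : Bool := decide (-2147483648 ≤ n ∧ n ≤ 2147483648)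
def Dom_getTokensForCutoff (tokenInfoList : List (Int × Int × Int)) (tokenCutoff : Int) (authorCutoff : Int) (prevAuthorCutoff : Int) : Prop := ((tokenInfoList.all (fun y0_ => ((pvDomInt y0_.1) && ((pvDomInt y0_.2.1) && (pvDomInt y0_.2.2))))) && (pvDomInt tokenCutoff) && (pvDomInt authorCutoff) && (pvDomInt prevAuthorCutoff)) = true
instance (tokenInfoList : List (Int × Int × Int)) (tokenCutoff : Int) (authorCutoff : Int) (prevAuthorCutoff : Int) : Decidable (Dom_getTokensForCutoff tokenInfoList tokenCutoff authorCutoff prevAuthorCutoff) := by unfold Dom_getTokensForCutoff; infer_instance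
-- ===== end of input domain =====

-- B replaces A's interleaved accumulate-and-break loop by a boundary scan (where does the
-- running count reach the cutoff?) followed by two filter passes over that prefix
-- (a different decomposition, same asymptotic cost).

-- ===== PORT A =====
-- A's for-loop with break, as structural recursion over the same state (count, chosen, skipped).
def pvGoA (authorCutoff prevAuthorCutoff tokenCutoff : Int) :
    List (Int × Int × Int) → Int → List (Int × Int × Int) → List (Int × Int × Int) →
    (List (Int × Int × Int)) × (List (Int × Int × Int))
  | [], _, chosen, skipped => (chosen, skipped)
  | t :: rest, count, chosen, skipped =>
    let authorFreq := t.2.2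
    if authorFreq > authorCutoff then
      if count + 1 ≥ tokenCutoff then (chosen ++ [t], skipped)
      else pvGoA authorCutoff prevAuthorCutoff tokenCutoff rest (count + 1) (chosen ++ [t]) skipped
    else if authorFreq > prevAuthorCutoff then
      if count ≥ tokenCutoff then (chosen, skipped ++ [t])
      else pvGoA authorCutoff prevAuthorCutoff tokenCutoff rest count chosen (skipped ++ [t])
    else
      if count ≥ tokenCutoff then (chosen, skipped)
      else pvGoA authorCutoff prevAuthorCutoff tokenCutoff rest count chosen skipped

def getTokensForCutoff (tokenInfoList : List (Int × Int × Int)) (tokenCutoff : Int) (authorCutoff : Int) (prevAuthorCutoff : Int) : (List (Int × Int × Int)) × (List (Int × Int × Int)) :=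
  pvGoA authorCutoff prevAuthorCutoff tokenCutoff tokenInfoList 0 [] []

-- ===== PORT B =====
-- Source B's boundary loop: the index just past the element at which the running count of
-- frequent tokens reaches the cutoff (the list's length if it never does).
def pvEndB (authorCutoff tokenCutoff : Int) :
    List (Int × Int × Int) → Int → Nat → Nat
  | [], _, i => i
  | t :: rest, count, i =>
    let count' := count + (if t.2.2 > authorCutoff then 1 else 0)
    if count' ≥ tokenCutoff then i + 1
    else pvEndB authorCutoff tokenCutoff rest count' (i + 1)

def getTokensForCutoff_alt (tokenInfoList : List (Int × Int × Int)) (tokenCutoff : Int) (authorCutoff : Int) (prevAuthorCutoff : Int) : (List (Int × Int × Int)) × (List (Int × Int × Int)) :=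
  let pfx := tokenInfoList.take (pvEndB authorCutoff tokenCutoff tokenInfoList 0 0)
  (pfx.filter (fun t => t.2.2 > authorCutoff),
   pfx.filter (fun t => prevAuthorCutoff < t.2.2 ∧ t.2.2 ≤ authorCutoff))

-- ===== PRECONDITION & SPEC =====
def Spec_getTokensForCutoff (tokenInfoList : List (Int × Int × Int)) (tokenCutoff : Int) (authorCutoff : Int) (prevAuthorCutoff : Int) (out : (List (Int × Int × Int)) × (List (Int × Int × Int))) : Prop := out = getTokensForCutoff_alt tokenInfoList tokenCutoff authorCutoff prevAuthorCutoff
instance (tokenInfoList : List (Int × Int × Int)) (tokenCutoff : Int) (authorCutoff : Int) (prevAuthorCutoff : Int) (out : (List (Int × Int × Int)) × (List (Int × Int × Int))) : Decidable (Spec_getTokensForCutoff tokenInfoList tokenCutoff authorCutoff prevAuthorCutoff out) := by unfold Spec_getTokensForCutoff; infer_instance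

-- ===== CLAIM (what is proved, stated in full; the proofs are below) =====
def Claim_equal_getTokensForCutoff : Prop := ∀ (tokenInfoList : List (Int × Int × Int)) (tokenCutoff : Int) (authorCutoff : Int) (prevAuthorCutoff : Int), Dom_getTokensForCutoff tokenInfoList tokenCutoff authorCutoff prevAuthorCutoff → Spec_getTokensForCutoff tokenInfoList tokenCutoff authorCutoff prevAuthorCutoff (getTokensForCutoff tokenInfoList tokenCutoff authorCutoff prevAuthorCutoff)

-- ===== LEMMAS AND PROOFS =====

-- The loop index only shifts pvEndB's result.
theorem pvEndB_shift (authorCutoff tokenCutoff : Int) :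
    ∀ (l : List (Int × Int × Int)) (count : Int) (i : Nat),
      pvEndB authorCutoff tokenCutoff l count i =
        i + pvEndB authorCutoff tokenCutoff l count 0 := by
  intro l
  induction l with
  | nil => intro count i; simp [pvEndB]
  | cons t rest ih =>
    intro count i
    by_cases hb : count + (if t.2.2 > authorCutoff then 1 else 0) ≥ tokenCutoff
    · simp [pvEndB, hb]
    · simp only [pvEndB, if_neg hb]
      rw [ih _ (i + 1), ih _ (0 + 1)]
      omega

-- Invariant: A's loop from state (count, chosen, skipped) appends exactly the two filters
-- of the prefix B's boundary scan determines from the same running count.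
theorem pvGoA_eq_takeEnd (authorCutoff prevAuthorCutoff tokenCutoff : Int) :
    ∀ (l : List (Int × Int × Int)) (count : Int)
      (chosen skipped : List (Int × Int × Int)),
      pvGoA authorCutoff prevAuthorCutoff tokenCutoff l count chosen skipped =
        (chosen ++ (l.take (pvEndB authorCutoff tokenCutoff l count 0)).filter
            (fun t => t.2.2 > authorCutoff),
         skipped ++ (l.take (pvEndB authorCutoff tokenCutoff l count 0)).filter
            (fun t => prevAuthorCutoff < t.2.2 ∧ t.2.2 ≤ authorCutoff)) := by
  intro l
  induction l with
  | nil => intro count chosen skipped; simp [pvGoA, pvEndB]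
  | cons t rest ih =>
    intro count chosen skipped
    by_cases hac : t.2.2 > authorCutoff
    · by_cases hbrk : count + 1 ≥ tokenCutoff
      · have hE : pvEndB authorCutoff tokenCutoff (t :: rest) count 0 = 1 := by
          simp [pvEndB, hac]; omega
        simp [pvGoA, hac, hbrk, hE, List.filter, not_le.mpr hac]
      · have hE : pvEndB authorCutoff tokenCutoff (t :: rest) count 0 =
            1 + pvEndB authorCutoff tokenCutoff rest (count + 1) 0 := by
          simp only [pvEndB, if_pos hac]
          rw [if_neg hbrk, pvEndB_shift authorCutoff tokenCutoff rest _ (0 + 1)]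
        rw [show pvGoA authorCutoff prevAuthorCutoff tokenCutoff (t :: rest) count chosen skipped
              = pvGoA authorCutoff prevAuthorCutoff tokenCutoff rest (count + 1)
                  (chosen ++ [t]) skipped from by simp [pvGoA, hac, hbrk],
            ih (count + 1) (chosen ++ [t]) skipped, hE]
        simp [Nat.add_comm 1, hac, not_le.mpr hac]
    · by_cases hbrk : count ≥ tokenCutoff
      · have hE : pvEndB authorCutoff tokenCutoff (t :: rest) count 0 = 1 := by
          simp [pvEndB, hac]; omega
        by_cases hpc : t.2.2 > prevAuthorCutoff
        · simp [pvGoA, hac, hpc, hbrk, hE, List.filter, not_lt.mp hac]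
        · simp [pvGoA, hac, hpc, hbrk, hE, List.filter]
      · have hE : pvEndB authorCutoff tokenCutoff (t :: rest) count 0 =
            1 + pvEndB authorCutoff tokenCutoff rest count 0 := by
          simp only [pvEndB, if_neg hac, Int.add_zero]
          rw [if_neg hbrk, pvEndB_shift authorCutoff tokenCutoff rest count (0 + 1)]
        by_cases hpc : t.2.2 > prevAuthorCutoff
        · rw [show pvGoA authorCutoff prevAuthorCutoff tokenCutoff (t :: rest) count chosen skipped
                = pvGoA authorCutoff prevAuthorCutoff tokenCutoff rest count
                    chosen (skipped ++ [t]) from by simp [pvGoA, hac, hpc, hbrk],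
              ih count chosen (skipped ++ [t]), hE]
          simp [Nat.add_comm 1, hac, hpc, not_lt.mp hac]
        · rw [show pvGoA authorCutoff prevAuthorCutoff tokenCutoff (t :: rest) count chosen skipped
                = pvGoA authorCutoff prevAuthorCutoff tokenCutoff rest count
                    chosen skipped from by simp [pvGoA, hac, hpc, hbrk],
              ih count chosen skipped, hE]
          simp [Nat.add_comm 1, hac, hpc, not_lt.mp hac]

-- ===== VERDICT (by name: the statement is the Claim_ definition above) =====
theorem getTokensForCutoff_spec : Claim_equal_getTokensForCutoff := by
  intro l tokenCutoff authorCutoff prevAuthorCutoff _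
  unfold Spec_getTokensForCutoff getTokensForCutoff getTokensForCutoff_alt
  rw [pvGoA_eq_takeEnd]
  simp
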